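-- pv_equiv track=rewrite | github.com/Bekal17/BACKEND-BLOCK-ID | backend_blockid/scheduler/engine.py | _max_anomaly_severity
-- ===== SOURCE A (Python) =====
-- from typing import Any
--
-- def _max_anomaly_severity(metadata: dict[str, Any]) -> str | None:
--     """
--     Return the highest anomaly severity in metadata (critical > high > medium > low).
--     None if no anomaly_flags or empty.
--     """
--     order = ("low", "medium", "high", "critical")
--     flags = metadata.get("anomaly_flags") or []
--     if not flags:
--         return None
--     severities = [f.get("severity") for f in flags if isinstance(f, dict) and f.get("severity")]
--     if not severities:
--         return None
--     return max(severities, key=lambda s: order.index(s) if s in order else -1)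
-- ===== SOURCE B (Python) =====
-- def _max_anomaly_severity(metadata):
--     """
--     Return the highest anomaly severity in metadata (critical > high > medium > low).
--     None if no anomaly_flags or empty.
--     """
--     order = ("low", "medium", "high", "critical")
--     flags = metadata.get("anomaly_flags") or []
--     if not flags:
--         return None
--     severities = [f.get("severity") for f in flags if isinstance(f, dict) and f.get("severity")]
--     if not severities:
--         return None
--     present = set(severities)
--     for sev in reversed(order):
--         if sev in present:
--             return sev
--     # no known label present: max's key is -1 everywhere, ties break to the first element
--     return severities[0]
-- ===== Notes on version B (the rewrite author's own statement) =====
-- stated objective: alternative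
-- what changed: Replaces the keyed max over the severities list by a membership set plus one scan over the four rank labels from highest to lowest, returning the first label present (falling back to the first collected severity when no label is known).
import Mathlib
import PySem

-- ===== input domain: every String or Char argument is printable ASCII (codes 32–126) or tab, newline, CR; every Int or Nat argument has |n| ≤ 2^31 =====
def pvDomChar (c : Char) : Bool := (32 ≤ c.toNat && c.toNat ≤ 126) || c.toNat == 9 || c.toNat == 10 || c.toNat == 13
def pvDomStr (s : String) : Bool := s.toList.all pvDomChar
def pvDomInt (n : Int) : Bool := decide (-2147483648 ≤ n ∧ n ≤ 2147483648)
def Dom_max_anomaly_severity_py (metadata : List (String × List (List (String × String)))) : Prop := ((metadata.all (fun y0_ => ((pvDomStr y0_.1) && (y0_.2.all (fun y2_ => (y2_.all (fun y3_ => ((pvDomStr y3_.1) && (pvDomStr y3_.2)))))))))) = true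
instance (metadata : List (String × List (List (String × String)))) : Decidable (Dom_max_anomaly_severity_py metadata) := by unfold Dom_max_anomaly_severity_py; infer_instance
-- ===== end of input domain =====

-- B replaces A's keyed max over the severities by a membership set scanned against the
-- four rank labels highest-first (same guards and collection pass); alternative, not faster.


-- ===== PORT A =====
-- order = ("low", "medium", "high", "critical")
def pvOrder : List String := ["low", "medium", "high", "critical"]

-- the comprehension [f.get("severity") for f in flags if isinstance(f, dict) and f.get("severity")]
-- (identical line in A and in B; every f is a dict under the type convention, truthiness = nonempty string)
def pvSeverities (flags : List (List (String × String))) : List String :=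
  flags.filterMap (fun f =>
    match (PySem.Dict.mk f).get? "severity" with
    | some s => if s = "" then none else some s
    | none => none)

-- key = lambda s: order.index(s) if s in order else -1
def pvSevKey (s : String) : Int :=
  match PySem.List.index? pvOrder s with
  | some k => (k : Int)
  | none => -1

def max_anomaly_severity_py (metadata : List (String × List (List (String × String)))) : Option String :=
  -- flags = metadata.get("anomaly_flags") or []
  let flags := ((PySem.Dict.mk metadata).get? "anomaly_flags").getD []
  if flags = [] then none
  else
    let severities := pvSeverities flags
    if severities = [] then none
    else PySem.List.max? severities pvSevKey

-- ===== PORT B =====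
def max_anomaly_severity_py_alt (metadata : List (String × List (List (String × String)))) : Option String :=
  let flags := ((PySem.Dict.mk metadata).get? "anomaly_flags").getD []
  if flags = [] then none
  else
    let severities := pvSeverities flags
    if severities = [] then none
    else
      let present : PySem.Set String := PySem.Set.ofList severities
      -- for sev in reversed(order): if sev in present: return sev
      match pvOrder.reverse.find? (fun sev => present.contains sev) with
      | some sev => some sev
      | none => PySem.List.pyGet? severities 0   -- return severities[0]

-- ===== PRECONDITION & SPEC =====
def Spec_max_anomaly_severity_py (metadata : List (String × List (List (String × String)))) (out : Option String) : Prop := out = max_anomaly_severity_py_alt metadata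
instance (metadata : List (String × List (List (String × String)))) (out : Option String) : Decidable (Spec_max_anomaly_severity_py metadata out) := by unfold Spec_max_anomaly_severity_py; infer_instance

-- ===== CLAIM (what is proved, stated in full; the proofs are below) =====
def Claim_equal_max_anomaly_severity_py : Prop := ∀ (metadata : List (String × List (List (String × String)))), Dom_max_anomaly_severity_py metadata → Spec_max_anomaly_severity_py metadata (max_anomaly_severity_py metadata)

-- ===== LEMMAS AND PROOFS =====

-- pvSevKey as a plain nested conditional
theorem pvSevKey_spec (s : String) :
    pvSevKey s = if s = "low" then 0 else if s = "medium" then 1 else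
      if s = "high" then 2 else if s = "critical" then 3 else -1 := by
  unfold pvSevKey pvOrder
  rw [PySem.List.index?_eq_idxOf?]
  by_cases h1 : s = "low" <;> by_cases h2 : s = "medium" <;>
    by_cases h3 : s = "high" <;> by_cases h4 : s = "critical" <;> subst_vars <;>
    first
      | decide
      | (simp only [List.idxOf?, List.findIdx?, List.findIdx?.go,
            beq_eq_false_iff_ne.mpr (Ne.symm h1), beq_eq_false_iff_ne.mpr (Ne.symm h2),
            beq_eq_false_iff_ne.mpr (Ne.symm h3), beq_eq_false_iff_ne.mpr (Ne.symm h4)]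
         simp [h1, h2, h3, h4])

-- the running max keeps its head when no later element beats it
theorem max?_cons_stay (t : List String) (m : String)
    (h : ∀ y ∈ t, ¬ pvSevKey m < pvSevKey y) :
    PySem.List.max? (m :: t) pvSevKey = some m := by
  induction t with
  | nil => rfl
  | cons y t ih =>
    have step : PySem.List.max? (m :: y :: t) pvSevKey = PySem.List.max? (m :: t) pvSevKey := by
      simp only [PySem.List.max?, List.foldl_cons]
      congr 1
      show (if pvSevKey m < pvSevKey y then some y else some m) = some m
      rw [if_neg (h y (by simp))]
    rw [step]
    exact ih (fun z hz => h z (by simp [hz]))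

-- max? returns c whenever c is in the list, dominates every key, and is uniquely keyed
theorem max?_eq_of_unique_max (S : List String) (c : String) (hc : c ∈ S)
    (hub : ∀ y ∈ S, pvSevKey y ≤ pvSevKey c)
    (huniq : ∀ y ∈ S, pvSevKey y = pvSevKey c → y = c) :
    PySem.List.max? S pvSevKey = some c := by
  cases h : PySem.List.max? S pvSevKey with
  | none =>
    rw [PySem.List.max?_eq_none_iff] at h
    subst h; simp at hc
  | some m =>
    have hmem := PySem.List.max?_mem h
    have hmax := PySem.List.max?_isMax h c hc
    have := hub m hmem
    have : pvSevKey m = pvSevKey c := le_antisymm this hmax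
    rw [huniq m hmem this]

-- the core: keyed max = highest-first scan over the four labels
theorem core_lemma (S : List String) (hne : S ≠ []) :
    PySem.List.max? S pvSevKey =
      (match pvOrder.reverse.find? (fun sev => (PySem.Set.ofList S).contains sev) with
       | some sev => some sev
       | none => PySem.List.pyGet? S 0) := by
  by_cases h3 : "critical" ∈ S
  · rw [show pvOrder.reverse.find? (fun sev => (PySem.Set.ofList S).contains sev)
        = some "critical" by simp [pvOrder, h3]]
    apply max?_eq_of_unique_max S "critical" h3
    · intro y _; rw [pvSevKey_spec, pvSevKey_spec]; split_ifs <;> simp_all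
    · intro y _ hk; rw [pvSevKey_spec y, pvSevKey_spec "critical"] at hk
      revert hk; split_ifs <;> simp_all
  by_cases h2 : "high" ∈ S
  · rw [show pvOrder.reverse.find? (fun sev => (PySem.Set.ofList S).contains sev)
        = some "high" by simp [pvOrder, h3, h2]]
    apply max?_eq_of_unique_max S "high" h2
    · intro y hy; rw [pvSevKey_spec, pvSevKey_spec]
      split_ifs <;> simp_all
    · intro y _ hk; rw [pvSevKey_spec y, pvSevKey_spec "high"] at hk
      revert hk; split_ifs <;> simp_all
  by_cases h1 : "medium" ∈ S
  · rw [show pvOrder.reverse.find? (fun sev => (PySem.Set.ofList S).contains sev)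
        = some "medium" by simp [pvOrder, h3, h2, h1]]
    apply max?_eq_of_unique_max S "medium" h1
    · intro y hy; rw [pvSevKey_spec, pvSevKey_spec]
      split_ifs <;> simp_all
    · intro y _ hk; rw [pvSevKey_spec y, pvSevKey_spec "medium"] at hk
      revert hk; split_ifs <;> simp_all
  by_cases h0 : "low" ∈ S
  · rw [show pvOrder.reverse.find? (fun sev => (PySem.Set.ofList S).contains sev)
        = some "low" by simp [pvOrder, h3, h2, h1, h0]]
    apply max?_eq_of_unique_max S "low" h0
    · intro y hy; rw [pvSevKey_spec, pvSevKey_spec]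
      split_ifs <;> simp_all
    · intro y _ hk; rw [pvSevKey_spec y, pvSevKey_spec "low"] at hk
      revert hk; split_ifs <;> simp_all
  · -- no known label: every key is -1, max is the first element, find? misses
    rw [show pvOrder.reverse.find? (fun sev => (PySem.Set.ofList S).contains sev)
        = none by simp [pvOrder, h3, h2, h1, h0]]
    obtain ⟨x, t, rfl⟩ := List.exists_cons_of_ne_nil hne
    have hkey : ∀ y ∈ x :: t, pvSevKey y = -1 := by
      intro y hy
      rw [pvSevKey_spec]
      split_ifs with e0 e1 e2 e3 <;> [skip; skip; skip; skip; rfl] <;>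
        subst_vars <;> simp_all
    have hg : PySem.List.pyGet? (x :: t) 0 = some x := by
      simp [PySem.List.pyGet?, PySem.List.pyIdx?]
    rw [max?_cons_stay t x (by
      intro y hy
      rw [hkey x (by simp), hkey y (by simp [hy])]
      omega)]
    exact hg.symm

-- ===== VERDICT (by name: the statement is the Claim_ definition above) =====
theorem max_anomaly_severity_py_spec : Claim_equal_max_anomaly_severity_py := by
  intro metadata _
  unfold Spec_max_anomaly_severity_py max_anomaly_severity_py max_anomaly_severity_py_alt
  by_cases hf : ((PySem.Dict.mk metadata).get? "anomaly_flags").getD [] = []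
  · simp [hf]
  · simp only [hf, if_false]
    by_cases hs : pvSeverities (((PySem.Dict.mk metadata).get? "anomaly_flags").getD []) = []
    · simp [hs]
    · simp only [hs, if_false]
      exact core_lemma _ hs
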